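-- pv_equiv track=rewrite | github.com/kr2020lbh/Problem | Python/SWEA/D2/FAIL_SWEA_1928.py | bits24_to_nums
-- ===== SOURCE A (Python) =====
-- def bits24_to_nums(bits24):
--     bit_place = 7
--     num = 0
--     result = []
--     for bit in bits24:
--         if bit_place < 0 :
--             result.append(num)
--             num = 0
--             bit_place = 7
--         if bit==1:
--             num += (bit+1)**(bit_place)
--         bit_place-=1
--     else:
--         result.append(num)
--
--     return result
-- ===== SOURCE B (Python) =====
-- def bits24_to_nums(bits24):
--     result = []
--     i = 0
--     while True:
--         group = bits24[i:i + 8]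
--         result.append(sum(2 ** (7 - j) for j, b in enumerate(group) if b == 1))
--         i += 8
--         if i >= len(bits24):
--             return result
-- ===== Notes on version B (the rewrite author's own statement) =====
-- stated objective: alternative
-- what changed: A's single stateful loop tracking bit_place/num with a deferred append is replaced by a loop over 8-element slices, each valued with a closed-form sum over enumerate; testing for exit only after appending reproduces A's final-append behaviour on empty input.
import Mathlib
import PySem

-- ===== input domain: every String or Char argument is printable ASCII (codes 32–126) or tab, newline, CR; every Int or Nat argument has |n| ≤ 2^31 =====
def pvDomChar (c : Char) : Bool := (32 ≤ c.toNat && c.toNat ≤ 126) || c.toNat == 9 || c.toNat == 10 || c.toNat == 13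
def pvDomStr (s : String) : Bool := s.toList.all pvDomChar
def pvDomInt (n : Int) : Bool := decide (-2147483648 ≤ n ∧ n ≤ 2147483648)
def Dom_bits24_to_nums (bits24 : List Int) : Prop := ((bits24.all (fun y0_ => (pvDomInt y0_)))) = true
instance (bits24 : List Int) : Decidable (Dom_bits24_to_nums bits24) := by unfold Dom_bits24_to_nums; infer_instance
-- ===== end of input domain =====

-- B replaces A's stateful bit_place/num accumulator loop by a recursive decomposition:
-- value the first 8-element slice in closed form, then recurse on the rest ('alternative').

-- ===== PORT A =====
-- one iteration of A's for-loop over state (bit_place, num, result)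
def aStep (st : Int × Int × List Int) (bit : Int) : Int × Int × List Int :=
  let st1 := if st.1 < 0 then ((7 : Int), (0 : Int), st.2.2 ++ [st.2.1]) else st
  let num := if bit == 1 then st1.2.1 + (bit + 1) ^ st1.1.toNat else st1.2.1
  (st1.1 - 1, num, st1.2.2)

def bits24_to_nums (bits24 : List Int) : List Int :=
  let s := bits24.foldl aStep (7, 0, [])
  s.2.2 ++ [s.2.1]

-- ===== PORT B =====
-- sum(2**(7-j) for j, b in enumerate(g) if b == 1); g is always a slice of <= 8 elements,
-- so the Python exponent 7-j is >= 0 and 2^((7-j).toNat) is exact there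
def groupVal (g : List Int) : Int :=
  (PySem.List.enumerate g 0).foldl
    (fun acc p => if p.2 == 1 then acc + (2 : Int) ^ ((7 - p.1).toNat) else acc) 0

-- B's while loop: result/i are the loop state; the loop exits when i >= len(bits24)
def altLoop (bits24 : List Int) (result : List Int) (i : Nat) : List Int :=
  let group := PySem.List.slice bits24 (some (i : Int)) (some ((i : Int) + 8))
  let result' := result ++ [groupVal group]
  if bits24.length ≤ i + 8 then result'
  else altLoop bits24 result' (i + 8)
termination_by bits24.length - i

def bits24_to_nums_alt (bits24 : List Int) : List Int :=
  altLoop bits24 [] 0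

-- ===== PRECONDITION & SPEC =====
def Spec_bits24_to_nums (bits24 : List Int) (out : List Int) : Prop := out = bits24_to_nums_alt bits24
instance (bits24 : List Int) (out : List Int) : Decidable (Spec_bits24_to_nums bits24 out) := by unfold Spec_bits24_to_nums; infer_instance

-- ===== CLAIM (what is proved, stated in full; the proofs are below) =====
def Claim_equal_bits24_to_nums : Prop := ∀ (bits24 : List Int), Dom_bits24_to_nums bits24 → Spec_bits24_to_nums bits24 (bits24_to_nums bits24)

-- ===== LEMMAS AND PROOFS =====

-- proof-side closed form of one group's value, indexed from position j
def gv (j : Int) : List Int → Int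
  | [] => 0
  | b :: t => (if b = 1 then (2 : Int) ^ ((7 - j).toNat) else 0) + gv (j + 1) t

theorem groupVal_aux (g : List Int) : ∀ (j : Int) (acc : Int),
    (PySem.List.enumerate g j).foldl
      (fun acc p => if p.2 == 1 then acc + (2 : Int) ^ ((7 - p.1).toNat) else acc) acc
      = acc + gv j g := by
  induction g with
  | nil => intro j acc; simp [PySem.List.enumerate_nil, gv]
  | cons b t ih =>
      intro j acc
      simp only [PySem.List.enumerate_cons, List.foldl_cons, ih, gv]
      split_ifs with h1 h2 h2 <;> simp_all <;> try ring

theorem groupVal_eq_gv (g : List Int) : groupVal g = gv 0 g := by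
  unfold groupVal
  simpa using groupVal_aux g 0 0

-- proof-side chunk recursion: B's while loop computed on the suffix it has not consumed yet
def refChunks (xs : List Int) : List Int :=
  if xs.drop 8 = [] then [gv 0 (xs.take 8)]
  else gv 0 (xs.take 8) :: refChunks (xs.drop 8)
termination_by xs.length
decreasing_by
  rename_i h
  have h8 : ¬ xs.length ≤ 8 := fun hle => h (List.drop_eq_nil_of_le hle)
  simp only [List.length_drop]
  omega

theorem altLoop_eq : ∀ (n : Nat) (xs result : List Int) (i : Nat), xs.length - i ≤ n →
    altLoop xs result i = result ++ refChunks (xs.drop i) := by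
  intro n
  induction n with
  | zero =>
      intro xs result i h
      have hle : xs.length ≤ i + 8 := by omega
      rw [altLoop, refChunks]
      have hnil : (xs.drop i).drop 8 = [] := by
        rw [List.drop_drop]
        exact List.drop_eq_nil_of_le (by omega)
      have hsl : PySem.List.slice xs (some (i : Int)) (some ((i : Int) + 8)) = (xs.drop i).take 8 := by
        simpa using PySem.List.slice_natCast_add xs i 8
      simp [hle, hnil, hsl, groupVal_eq_gv]
  | succ n ih =>
      intro xs result i h
      rw [altLoop, refChunks]
      have hsl : PySem.List.slice xs (some (i : Int)) (some ((i : Int) + 8)) = (xs.drop i).take 8 := by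
        simpa using PySem.List.slice_natCast_add xs i 8
      by_cases hle : xs.length ≤ i + 8
      · have hnil : (xs.drop i).drop 8 = [] := by
          rw [List.drop_drop]
          exact List.drop_eq_nil_of_le (by omega)
        simp [hle, hnil, hsl, groupVal_eq_gv]
      · have hnil : ¬ (xs.drop i).drop 8 = [] := by
          rw [List.drop_drop]
          intro hc
          have := congrArg List.length hc
          simp at this
          omega
        rw [ih xs _ (i + 8) (by omega)]
        simp [hle, hsl, groupVal_eq_gv, List.drop_drop]

-- B's port equals the chunk recursion
theorem alt_eq_refChunks (xs : List Int) : bits24_to_nums_alt xs = refChunks xs := by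
  unfold bits24_to_nums_alt
  simpa using altLoop_eq xs.length xs [] 0 (by omega)

-- the fold over one (partial) group, started at bit_place 7 - j, never resets
theorem stepA (xs : List Int) : ∀ (j : Int) (num : Int) (res : List Int),
    0 ≤ j → (xs.length : Int) + j ≤ 8 →
    xs.foldl aStep (7 - j, num, res) = (7 - j - xs.length, num + gv j xs, res) := by
  induction xs with
  | nil => intro j num res _ _; simp [gv]
  | cons b t ih =>
      intro j num res hj hle
      have hlt : ¬ (7 - j < 0) := by
        simp only [List.length_cons] at hle
        push_cast at hle
        omega
      have h7 : 7 - (j + 1) = 7 - j - 1 := by ring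
      simp only [List.foldl_cons, aStep, hlt, if_false]
      rw [show (7 - j - 1 : Int) = 7 - (j + 1) by ring,
          ih (j + 1) _ _ (by omega) (by simp only [List.length_cons] at hle; push_cast at hle; omega)]
      simp only [gv, List.length_cons, Prod.mk.injEq]
      refine ⟨by push_cast; ring, ?_, trivial⟩
      by_cases hb : b = 1
      · subst hb; norm_num; ring
      · simp [hb]
  
-- after a full group bit_place is -1; A's reset at the next bit equals restarting at (7,0)
-- with the finished value appended
theorem resetStep (num : Int) (res : List Int) (b : Int) :
    aStep (-1, num, res) b = aStep (7, 0, res ++ [num]) b := by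
  simp [aStep]

theorem mainA : ∀ (n : Nat) (xs : List Int) (res : List Int), xs.length ≤ n →
    (xs.foldl aStep (7, 0, res)).2.2 ++ [(xs.foldl aStep (7, 0, res)).2.1]
      = res ++ refChunks xs := by
  intro n
  induction n with
  | zero =>
      intro xs res h
      have hx : xs = [] := List.eq_nil_of_length_eq_zero (Nat.le_zero.mp h)
      subst hx
      rw [refChunks]
      simp [gv]
  | succ n ih =>
      intro xs res h
      by_cases h8 : xs.length ≤ 8
      · have hs : xs.foldl aStep (7, 0, res) = (7 - (0:Int) - xs.length, 0 + gv 0 xs, res) := by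
          have := stepA xs 0 0 res (by omega) (by exact_mod_cast by omega)
          simpa using this
        rw [hs, refChunks]
        simp [h8, List.take_of_length_le h8]
      · -- xs longer than one group: split off the first 8 bits
        rw [not_le] at h8
        have hxs : xs = xs.take 8 ++ xs.drop 8 := (List.take_append_drop 8 xs).symm
        have hlen8 : (xs.take 8).length = 8 := by simp; omega
        have hfold8 : (xs.take 8).foldl aStep (7, 0, res) = (-1, gv 0 (xs.take 8), res) := by
          have := stepA (xs.take 8) 0 0 res (by omega) (by simp [hlen8])
          rw [show ((7:Int), (0:Int), res) = (7 - 0, 0, res) by norm_num]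
          rw [this, hlen8]
          norm_num
        obtain ⟨b, t, hbt⟩ : ∃ b t, xs.drop 8 = b :: t := by
          cases hd : xs.drop 8 with
          | nil => exfalso; have := congrArg List.length hd; simp at this; omega
          | cons b t => exact ⟨b, t, rfl⟩
        have hshift : (xs.drop 8).foldl aStep (-1, gv 0 (xs.take 8), res)
            = (xs.drop 8).foldl aStep (7, 0, res ++ [gv 0 (xs.take 8)]) := by
          rw [hbt]
          simp only [List.foldl_cons, resetStep]
        have hih := ih (xs.drop 8) (res ++ [gv 0 (xs.take 8)])
          (by simp; omega)
        calc (xs.foldl aStep (7, 0, res)).2.2 ++ [(xs.foldl aStep (7, 0, res)).2.1]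
            = ((xs.take 8 ++ xs.drop 8).foldl aStep (7, 0, res)).2.2
              ++ [((xs.take 8 ++ xs.drop 8).foldl aStep (7, 0, res)).2.1] := by rw [← hxs]
          _ = ((xs.drop 8).foldl aStep (7, 0, res ++ [gv 0 (xs.take 8)])).2.2
              ++ [((xs.drop 8).foldl aStep (7, 0, res ++ [gv 0 (xs.take 8)])).2.1] := by
                rw [List.foldl_append, hfold8, hshift]
          _ = (res ++ [gv 0 (xs.take 8)]) ++ refChunks (xs.drop 8) := hih
          _ = res ++ refChunks xs := by
                conv_rhs => rw [refChunks]
                simp [hbt]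

-- ===== VERDICT (by name: the statement is the Claim_ definition above) =====
theorem bits24_to_nums_spec : Claim_equal_bits24_to_nums := by
  intro bits24 _
  unfold Spec_bits24_to_nums bits24_to_nums
  rw [alt_eq_refChunks]
  simpa using mainA bits24.length bits24 [] le_rfl
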